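-- pv_equiv track=rewrite | github.com/iblech/mathematik-der-vorhersagen | markov-ketten/bot.py | group
-- ===== SOURCE A (Python) =====
-- DELIM = "#"
--
-- def group(corpus, n):
--     alts = []
--     cs   = []
--     starts = {}
--     for w in corpus.split(" ") + [""]:
--         alts.append(w)
--         if len(alts) == n:
--             s = DELIM.join(alts)
--             cs.append(s)
--             alts.pop(0)
--             if w in starts:
--                 starts[w].append(s)
--             else:
--                 starts[w] = [s]
--     return cs, starts
--
-- cs     = None   # Der Korpus als Liste von Wörtertupeln
--
-- starts = None   # Zustände, die ein gegebenes Wort enthalten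
-- ===== SOURCE B (Python) =====
-- DELIM = "#"
--
-- def group(corpus, n):
--     words = corpus.split(" ") + [""]
--     cs = []
--     starts = {}
--     if n >= 1:
--         for start in range(len(words) - n + 1):
--             win = words[start:start+n]
--             s = DELIM.join(win)
--             cs.append(s)
--             starts.setdefault(win[-1], []).append(s)
--     return cs, starts
-- ===== Notes on version B (the rewrite author's own statement) =====
-- stated objective: alternative
-- what changed: Replaces A's mutable sliding buffer (append, length check, pop(0)) with direct slicing: precompute the word list once and take words[start:start+n] for each window start, indexing the dict by the slice's last element via setdefault.
import Mathlib
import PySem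

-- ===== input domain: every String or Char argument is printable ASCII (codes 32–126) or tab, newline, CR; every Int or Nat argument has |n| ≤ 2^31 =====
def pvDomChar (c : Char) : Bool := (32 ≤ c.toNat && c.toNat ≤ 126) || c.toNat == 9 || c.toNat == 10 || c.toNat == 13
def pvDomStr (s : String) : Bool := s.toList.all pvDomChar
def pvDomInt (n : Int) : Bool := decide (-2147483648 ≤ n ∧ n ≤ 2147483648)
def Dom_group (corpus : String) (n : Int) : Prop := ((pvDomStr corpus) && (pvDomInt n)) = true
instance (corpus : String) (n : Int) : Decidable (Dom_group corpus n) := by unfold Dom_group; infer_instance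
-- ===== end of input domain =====

-- B replaces A's mutable sliding buffer with direct slicing over the precomputed word list (alternative decomposition, same cost).

-- ===== PORT A =====
-- A's loop body, one step per word w; state = (alts, cs, starts)
def groupStepA (n : Int) (st : List String × List String × PySem.Dict String (List String))
    (w : String) : List String × List String × PySem.Dict String (List String) :=
  let alts := st.1 ++ [w]
  if (alts.length : Int) = n then
    let s := PySem.Str.join "#" alts
    let cs := st.2.1 ++ [s]
    let alts' := alts.drop 1  -- alts.pop(0): the popped value is discarded
    let starts := if st.2.2.contains w then st.2.2.modify w [] (· ++ [s]) else st.2.2.insert w [s]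
    (alts', cs, starts)
  else
    (alts, st.2.1, st.2.2)

def group (corpus : String) (n : Int) : List String × (List (String × List String)) :=
  -- corpus.split(" "): the separator is the non-empty literal " ", so split? is always some; getD [] is exact
  let res := ((PySem.Str.split? corpus " ").getD [] ++ [""]).foldl (groupStepA n)
    ([], [], PySem.Dict.empty)
  (res.2.1, res.2.2.items)

-- ===== PORT B =====
-- B's loop body, one step per window start
def groupStepB (words : List String) (n : Int)
    (acc : List String × PySem.Dict String (List String)) (start : Int) :
    List String × PySem.Dict String (List String) :=
  let win := PySem.List.slice words (some start) (some (start + n))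
  let s := PySem.Str.join "#" win
  let last := (PySem.List.pyGet? win (-1)).getD ""  -- win[-1]; win is nonempty for every start B iterates over, so getD "" is exact
  (acc.1 ++ [s], acc.2.modify last [] (· ++ [s]))   -- starts.setdefault(win[-1], []).append(s)

def group_alt (corpus : String) (n : Int) : List String × (List (String × List String)) :=
  let words := (PySem.Str.split? corpus " ").getD [] ++ [""]  -- non-empty separator: split? is always some
  let init : List String × PySem.Dict String (List String) := ([], PySem.Dict.empty)
  let res :=
    if 1 ≤ n then
      (PySem.List.pyRange 0 ((words.length : Int) - n + 1) 1).foldl (groupStepB words n) init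
    else init
  (res.1, res.2.items)

-- ===== PRECONDITION & SPEC =====
def Spec_group (corpus : String) (n : Int) (out : List String × (List (String × List String))) : Prop := out = group_alt corpus n
instance (corpus : String) (n : Int) (out : List String × (List (String × List String))) : Decidable (Spec_group corpus n out) := by unfold Spec_group; infer_instance

-- ===== CLAIM (what is proved, stated in full; the proofs are below) =====
def Claim_equal_group : Prop := ∀ (corpus : String) (n : Int), Dom_group corpus n → Spec_group corpus n (group corpus n)

-- ===== LEMMAS AND PROOFS =====

-- all length-N windows of ws, front to back
def wins (N : Nat) : List String → List (List String)
  | [] => []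
  | w :: ws => if N ≤ ws.length + 1 then ((w :: ws).take N) :: wins N ws else []

-- the common per-window step: append the joined window, index it under its last word
def winStep (acc : List String × PySem.Dict String (List String)) (win : List String) :
    List String × PySem.Dict String (List String) :=
  let s := PySem.Str.join "#" win
  (acc.1 ++ [s], acc.2.modify (win.getLast?.getD "") [] (· ++ [s]))

theorem wins_short {N : Nat} {ws : List String} (h : ws.length < N) : wins N ws = [] := by
  cases ws with
  | nil => rfl
  | cons w ws => simp only [wins]; rw [if_neg]; simpa using h

theorem wins_cons_eq {N : Nat} (alts ws : List String) (h : alts.length = N) (hne : alts ≠ []) :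
    wins N (alts ++ ws) = alts :: wins N (alts.drop 1 ++ ws) := by
  cases alts with
  | nil => exact absurd rfl hne
  | cons a rest =>
    simp only [List.cons_append, wins, List.drop_one, List.tail_cons]
    rw [if_pos (by simp at h ⊢; omega)]
    congr 1
    rw [← List.cons_append]
    have htake : List.take (a :: rest).length ((a :: rest) ++ ws) = a :: rest :=
      List.take_left
    rw [h] at htake
    exact htake

-- A's "if w in starts … else …" update is exactly Dict.modify (setdefault-append)
theorem dict_upd (d : PySem.Dict String (List String)) (w s : String) :
    (if d.contains w then d.modify w [] (· ++ [s]) else d.insert w [s]) =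
      d.modify w [] (· ++ [s]) := by
  by_cases h : d.contains w = true
  · rw [if_pos h]
  · rw [if_neg h]
    have hf : d.items.find? (fun p => p.1 == w) = none := by
      apply List.find?_eq_none.mpr
      intro p hp hb
      exact h (by simp only [PySem.Dict.contains, List.any_eq_true]; exact ⟨p, hp, hb⟩)
    simp [PySem.Dict.modify, PySem.Dict.getD, PySem.Dict.get?, hf]

-- A's fold, started from any buffer shorter than N, emits exactly the length-N windows of buf ++ ws
theorem foldA_eq (N : Nat) :
    ∀ (ws buf cs : List String) (d : PySem.Dict String (List String)), buf.length < N →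
    (ws.foldl (groupStepA (N : Int)) (buf, cs, d)).2 =
      (wins N (buf ++ ws)).foldl winStep (cs, d) := by
  intro ws
  induction ws with
  | nil =>
    intro buf cs d h
    rw [List.append_nil, wins_short h]
    rfl
  | cons w ws ih =>
    intro buf cs d h
    simp only [List.foldl_cons, groupStepA]
    by_cases hl : (((buf ++ [w]).length : Int) = (N : Int))
    · rw [if_pos hl]
      have hlen : (buf ++ [w]).length = N := by exact_mod_cast hl
      have hlt : ((buf ++ [w]).drop 1).length < N := by
        simp only [List.length_drop, hlen]; omega
      rw [ih _ _ _ hlt,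
          show buf ++ w :: ws = (buf ++ [w]) ++ ws by simp,
          wins_cons_eq (buf ++ [w]) ws hlen (by simp), List.foldl_cons]
      congr 1
      simp only [winStep, List.getLast?_concat, Option.getD_some]
      rw [dict_upd d w (PySem.Str.join "#" (buf ++ [w]))]
    · rw [if_neg hl]
      have hlt : (buf ++ [w]).length < N := by
        have : (buf ++ [w]).length ≠ N := fun he => hl (by exact_mod_cast he)
        simp only [List.length_append, List.length_cons, List.length_nil] at this ⊢
        omega
      rw [ih _ _ _ hlt, show buf ++ w :: ws = (buf ++ [w]) ++ ws by simp]

-- A with n ≤ 0 never emits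
theorem foldA_neg (n : Int) (hn : n ≤ 0) :
    ∀ (ws buf cs : List String) (d : PySem.Dict String (List String)),
    (ws.foldl (groupStepA n) (buf, cs, d)).2 = (cs, d) := by
  intro ws
  induction ws with
  | nil => intro buf cs d; rfl
  | cons w ws ih =>
    intro buf cs d
    simp only [List.foldl_cons, groupStepA]
    rw [if_neg (by simp; omega)]
    exact ih _ _ _

-- windows as slices over the range of window starts
theorem wins_eq_map (N : Nat) (hN : 1 ≤ N) :
    ∀ ws : List String,
      wins N ws = (List.range (ws.length + 1 - N)).map (fun k => ((ws.drop k).take N)) := by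
  intro ws
  induction ws with
  | nil => simp [wins, Nat.sub_eq_zero_of_le hN]
  | cons w ws ih =>
    by_cases h : N ≤ ws.length + 1
    · simp only [wins, if_pos h, ih, List.length_cons]
      have hc : ws.length + 1 + 1 - N = (ws.length + 1 - N) + 1 := by omega
      rw [hc, List.range_succ_eq_map, List.map_cons, List.map_map]
      simp [Function.comp_def]
    · simp only [wins, if_neg h, List.length_cons]
      have hc : ws.length + 1 + 1 - N = 0 := by omega
      simp [hc]

theorem stepB_eq_winStep (N : Nat) (ws : List String) (k : Nat)
    (acc : List String × PySem.Dict String (List String)) :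
    groupStepB ws ((N : Nat) : Int) acc (0 + (k : Int)) = winStep acc ((ws.drop k).take N) := by
  simp only [groupStepB, winStep, zero_add]
  rw [PySem.List.slice_natCast_add, PySem.List.pyGet?_neg_one]

-- B's fold equals the common fold over windows
theorem foldB_eq (N : Nat) (hN : 1 ≤ N) (ws : List String)
    (init : List String × PySem.Dict String (List String)) :
    (PySem.List.pyRange 0 ((ws.length : Int) - (N : Int) + 1) 1).foldl
        (groupStepB ws ((N : Nat) : Int)) init =
      (wins N ws).foldl winStep init := by
  rw [PySem.List.pyRange_one, wins_eq_map N hN ws, List.foldl_map, List.foldl_map]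
  have hcnt : (((ws.length : Int) - (N : Int) + 1) - 0).toNat = ws.length + 1 - N := by omega
  rw [hcnt]
  have hfun : (fun (acc : List String × PySem.Dict String (List String)) (k : Nat) =>
        groupStepB ws ((N : Nat) : Int) acc (0 + (k : Int))) =
      fun acc k => winStep acc ((ws.drop k).take N) := by
    funext acc k
    exact stepB_eq_winStep N ws k acc
  rw [hfun]

-- ===== VERDICT (by name: the statement is the Claim_ definition above) =====
theorem group_spec : Claim_equal_group := by
  intro corpus n _
  unfold Spec_group group group_alt
  dsimp only
  by_cases hn : 1 ≤ n
  · have hN : n = ((n.toNat : Nat) : Int) := by omega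
    rw [if_pos hn, hN,
        foldA_eq n.toNat _ [] [] PySem.Dict.empty (by simp; omega),
        List.nil_append, foldB_eq n.toNat (by omega)]
  · rw [if_neg hn, foldA_neg n (by omega)]
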